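-- pv_equiv track=rewrite | github.com/tibocin/beep-boop | modules/rag/rag_enhanced.py | _infer_subject
-- ===== SOURCE A (Python) =====
-- def _infer_subject(section: str, key: str, text: str) -> str:
--     """Infer the subject category from section, key, and text."""
--     text_lower = text.lower()
--     section_lower = section.lower()
--     key_lower = key.lower()
--
--     # Subject inference logic
--     if any(word in text_lower for word in ["project", "work", "build", "create"]):
--         return "projects"
--     elif any(word in text_lower for word in ["personality", "character", "traits"]):
--         return "personality"
--     elif any(word in text_lower for word in ["value", "believe", "principle"]):
--         return "values"
--     elif any(word in text_lower for word in ["technical", "skill", "problem", "solve"]):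
--         return "technical_skills"
--     elif any(word in text_lower for word in ["interest", "hobby", "passion"]):
--         return "interests"
--     elif any(word in text_lower for word in ["education", "learn", "study"]):
--         return "education"
--     elif any(word in text_lower for word in ["work", "experience", "career"]):
--         return "work_experience"
--     elif any(word in text_lower for word in ["favorite", "like", "prefer"]):
--         return "favorites"
--     elif any(word in text_lower for word in ["lifestyle", "habit", "routine"]):
--         return "lifestyle"
--     elif any(word in text_lower for word in ["family", "relationship"]):
--         return "family"
--     elif any(word in text_lower for word in ["spiritual", "spirituality"]):
--         return "spirituality"
--     elif any(word in text_lower for word in ["philosophy", "philosophical"]):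
--         return "philosophy"
--     elif any(word in text_lower for word in ["dream", "aspiration", "goal"]):
--         return "dreams"
--     elif any(word in text_lower for word in ["wisdom", "insight", "knowledge"]):
--         return "wisdom"
--     else:
--         return "general"
-- ===== SOURCE B (Python) =====
-- # Subject inference as an argmin over a keyword->(priority, category) map:
-- # collect every keyword occurring in the text and return the category of the
-- # lowest-priority hit (duplicate "work" keyword collapses to its winning
-- # priority 0, which is what the first-match chain yields anyway).
-- _KEYWORD_MAP = {
--     "project": (0, "projects"), "work": (0, "projects"),
--     "build": (0, "projects"), "create": (0, "projects"),
--     "personality": (1, "personality"), "character": (1, "personality"),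
--     "traits": (1, "personality"),
--     "value": (2, "values"), "believe": (2, "values"), "principle": (2, "values"),
--     "technical": (3, "technical_skills"), "skill": (3, "technical_skills"),
--     "problem": (3, "technical_skills"), "solve": (3, "technical_skills"),
--     "interest": (4, "interests"), "hobby": (4, "interests"),
--     "passion": (4, "interests"),
--     "education": (5, "education"), "learn": (5, "education"),
--     "study": (5, "education"),
--     "experience": (6, "work_experience"), "career": (6, "work_experience"),
--     "favorite": (7, "favorites"), "like": (7, "favorites"),
--     "prefer": (7, "favorites"),
--     "lifestyle": (8, "lifestyle"), "habit": (8, "lifestyle"),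
--     "routine": (8, "lifestyle"),
--     "family": (9, "family"), "relationship": (9, "family"),
--     "spiritual": (10, "spirituality"), "spirituality": (10, "spirituality"),
--     "philosophy": (11, "philosophy"), "philosophical": (11, "philosophy"),
--     "dream": (12, "dreams"), "aspiration": (12, "dreams"),
--     "goal": (12, "dreams"),
--     "wisdom": (13, "wisdom"), "insight": (13, "wisdom"),
--     "knowledge": (13, "wisdom"),
-- }
--
--
-- def _infer_subject(section: str, key: str, text: str) -> str:
--     """Infer the subject category: argmin-priority over all matching keywords."""
--     text_lower = text.lower()
--     hits = [v for kw, v in _KEYWORD_MAP.items() if kw in text_lower]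
--     return min(hits)[1] if hits else "general"
-- ===== Notes on version B (the rewrite author's own statement) =====
-- stated objective: alternative
-- what changed: Replaces the ordered if/elif early-return chain by a keyword->(priority,category) map: collect all keywords occurring in the text and return the category of the minimum-priority hit (min over tuples), with the redundant duplicate 'work' keyword collapsed to its winning priority.
import Mathlib
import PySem

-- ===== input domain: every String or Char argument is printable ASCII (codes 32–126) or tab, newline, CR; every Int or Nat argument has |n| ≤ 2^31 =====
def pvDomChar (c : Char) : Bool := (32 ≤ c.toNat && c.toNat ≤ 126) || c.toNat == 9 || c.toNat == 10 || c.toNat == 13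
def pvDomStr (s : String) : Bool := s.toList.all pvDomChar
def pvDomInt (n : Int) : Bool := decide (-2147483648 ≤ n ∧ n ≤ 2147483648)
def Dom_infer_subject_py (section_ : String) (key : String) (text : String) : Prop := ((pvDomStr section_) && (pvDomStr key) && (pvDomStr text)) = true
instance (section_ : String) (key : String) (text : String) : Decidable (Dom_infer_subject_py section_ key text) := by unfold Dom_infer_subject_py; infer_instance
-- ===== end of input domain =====

-- B replaces A's 14-branch first-match if/elif chain by an argmin over a keyword->(priority,category) map (objective: alternative); same return value everywhere.

-- ===== PORT A =====
def infer_subject_py (section_ : String) (key : String) (text : String) : String :=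
  let textLower := PySem.Str.lower text
  let _sectionLower := PySem.Str.lower section_
  let _keyLower := PySem.Str.lower key
  if (["project", "work", "build", "create"]).any (fun w => PySem.Str.isIn w textLower) then "projects"
  else if (["personality", "character", "traits"]).any (fun w => PySem.Str.isIn w textLower) then "personality"
  else if (["value", "believe", "principle"]).any (fun w => PySem.Str.isIn w textLower) then "values"
  else if (["technical", "skill", "problem", "solve"]).any (fun w => PySem.Str.isIn w textLower) then "technical_skills"
  else if (["interest", "hobby", "passion"]).any (fun w => PySem.Str.isIn w textLower) then "interests"
  else if (["education", "learn", "study"]).any (fun w => PySem.Str.isIn w textLower) then "education"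
  else if (["work", "experience", "career"]).any (fun w => PySem.Str.isIn w textLower) then "work_experience"
  else if (["favorite", "like", "prefer"]).any (fun w => PySem.Str.isIn w textLower) then "favorites"
  else if (["lifestyle", "habit", "routine"]).any (fun w => PySem.Str.isIn w textLower) then "lifestyle"
  else if (["family", "relationship"]).any (fun w => PySem.Str.isIn w textLower) then "family"
  else if (["spiritual", "spirituality"]).any (fun w => PySem.Str.isIn w textLower) then "spirituality"
  else if (["philosophy", "philosophical"]).any (fun w => PySem.Str.isIn w textLower) then "philosophy"
  else if (["dream", "aspiration", "goal"]).any (fun w => PySem.Str.isIn w textLower) then "dreams"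
  else if (["wisdom", "insight", "knowledge"]).any (fun w => PySem.Str.isIn w textLower) then "wisdom"
  else "general"

-- ===== PORT B =====
-- the dict _KEYWORD_MAP of Source B, in insertion order: keyword -> (priority, category)
def keywordMap : List (String × Nat × String) :=
  [("project", 0, "projects"), ("work", 0, "projects"),
   ("build", 0, "projects"), ("create", 0, "projects"),
   ("personality", 1, "personality"), ("character", 1, "personality"),
   ("traits", 1, "personality"),
   ("value", 2, "values"), ("believe", 2, "values"), ("principle", 2, "values"),
   ("technical", 3, "technical_skills"), ("skill", 3, "technical_skills"),
   ("problem", 3, "technical_skills"), ("solve", 3, "technical_skills"),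
   ("interest", 4, "interests"), ("hobby", 4, "interests"),
   ("passion", 4, "interests"),
   ("education", 5, "education"), ("learn", 5, "education"),
   ("study", 5, "education"),
   ("experience", 6, "work_experience"), ("career", 6, "work_experience"),
   ("favorite", 7, "favorites"), ("like", 7, "favorites"),
   ("prefer", 7, "favorites"),
   ("lifestyle", 8, "lifestyle"), ("habit", 8, "lifestyle"),
   ("routine", 8, "lifestyle"),
   ("family", 9, "family"), ("relationship", 9, "family"),
   ("spiritual", 10, "spirituality"), ("spirituality", 10, "spirituality"),
   ("philosophy", 11, "philosophy"), ("philosophical", 11, "philosophy"),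
   ("dream", 12, "dreams"), ("aspiration", 12, "dreams"),
   ("goal", 12, "dreams"),
   ("wisdom", 13, "wisdom"), ("insight", 13, "wisdom"),
   ("knowledge", 13, "wisdom")]

-- Python tuple strict comparison (p, c) < (q, d)
def pairLtB (x a : Nat × String) : Bool := x.1 < a.1 || (x.1 == a.1 && x.2 < a.2)

-- Python's min over a list of tuples: keep the first strictly-smallest element
def pyMin : List (Nat × String) → Option (Nat × String)
  | [] => none
  | h :: tl => some (tl.foldl (fun acc x => if pairLtB x acc then x else acc) h)

def infer_subject_py_alt (section_ : String) (key : String) (text : String) : String :=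
  let textLower := PySem.Str.lower text
  let hits := (keywordMap.filter (fun e => PySem.Str.isIn e.1 textLower)).map (fun e => e.2)
  match pyMin hits with
  | none => "general"
  | some v => v.2

-- ===== PRECONDITION & SPEC =====
def Spec_infer_subject_py (section_ : String) (key : String) (text : String) (out : String) : Prop := out = infer_subject_py_alt section_ key text
instance (section_ : String) (key : String) (text : String) (out : String) : Decidable (Spec_infer_subject_py section_ key text out) := by unfold Spec_infer_subject_py; infer_instance

-- ===== CLAIM (what is proved, stated in full; the proofs are below) =====
def Claim_equal_infer_subject_py : Prop := ∀ (section_ : String) (key : String) (text : String), Dom_infer_subject_py section_ key text → Spec_infer_subject_py section_ key text (infer_subject_py section_ key text)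

-- ===== LEMMAS AND PROOFS =====

-- first-match scan over a flat (keyword, priority, category) list
def scanF (t : String) : List (String × Nat × String) → String
  | [] => "general"
  | (kw, _, c) :: rest => if PySem.Str.isIn kw t then c else scanF t rest

-- a keyword group of A's chain, flattened
def grp (p : Nat) (c : String) (kws : List String) : List (String × Nat × String) :=
  kws.map (fun k => (k, p, c))

-- keywordMap with the duplicate "work" entry A's 7th branch carries
def flat40 : List (String × Nat × String) :=
  grp 0 "projects" ["project", "work", "build", "create"] ++
  (grp 1 "personality" ["personality", "character", "traits"] ++
  (grp 2 "values" ["value", "believe", "principle"] ++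
  (grp 3 "technical_skills" ["technical", "skill", "problem", "solve"] ++
  (grp 4 "interests" ["interest", "hobby", "passion"] ++
  (grp 5 "education" ["education", "learn", "study"] ++
  (grp 6 "work_experience" ["work", "experience", "career"] ++
  (grp 7 "favorites" ["favorite", "like", "prefer"] ++
  (grp 8 "lifestyle" ["lifestyle", "habit", "routine"] ++
  (grp 9 "family" ["family", "relationship"] ++
  (grp 10 "spirituality" ["spiritual", "spirituality"] ++
  (grp 11 "philosophy" ["philosophy", "philosophical"] ++
  (grp 12 "dreams" ["dream", "aspiration", "goal"] ++
  (grp 13 "wisdom" ["wisdom", "insight", "knowledge"] ++ [])))))))))))))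

-- non-strict Python tuple order, proof side
def pairLe (a b : Nat × String) : Prop := a.1 ≤ b.1 ∧ (a.1 = b.1 → a.2 = b.2)

theorem scan_grp (t : String) (p : Nat) (c : String) (kws : List String)
    (rest : List (String × Nat × String)) :
    scanF t (grp p c kws ++ rest) =
      if kws.any (fun w => PySem.Str.isIn w t) then c else scanF t rest := by
  induction kws with
  | nil => simp [grp, scanF]
  | cons k ks ih =>
    have hstep : scanF t (grp p c (k :: ks) ++ rest) =
        if PySem.Str.isIn k t then c else scanF t (grp p c ks ++ rest) := by
      simp [grp, scanF]
    rw [hstep, ih]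
    simp only [List.any_cons, Bool.or_eq_true]
    split_ifs <;> tauto

theorem A_eq_scan (section_ key text : String) :
    infer_subject_py section_ key text = scanF (PySem.Str.lower text) flat40 := by
  simp only [infer_subject_py, flat40, scan_grp, scanF]

theorem dup_drop (t : String) : scanF t flat40 = scanF t keywordMap := by
  cases h : PySem.Chars.isIn ['w', 'o', 'r', 'k'] t.toList <;>
    simp [flat40, keywordMap, grp, scanF, PySem.Str.isIn, h]

theorem pairLe_not_ltB (v x : Nat × String) (h : pairLe v x) : pairLtB x v = false := by
  obtain ⟨h1, h2⟩ := h
  by_cases he : x.1 = v.1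
  · have hx : ¬ x.1 < v.1 := by omega
    have hs : ¬ x.2 < v.2 := by rw [h2 he.symm]; exact lt_irrefl _
    simp [pairLtB, hx, hs]
  · have hx : ¬ x.1 < v.1 := by omega
    simp [pairLtB, hx, he]

theorem foldl_keep (hs : List (Nat × String)) (a : Nat × String)
    (h : ∀ x ∈ hs, pairLtB x a = false) :
    hs.foldl (fun acc x => if pairLtB x acc then x else acc) a = a := by
  induction hs with
  | nil => rfl
  | cons x tl ih =>
    have hx := h x (List.mem_cons_self ..)
    simp only [List.foldl_cons, hx, Bool.false_eq_true, if_false]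
    exact ih (fun y hy => h y (List.mem_cons_of_mem _ hy))

theorem scan_eq_min (t : String) (l : List (String × Nat × String))
    (hpw : List.Pairwise pairLe (l.map (fun e => e.2))) :
    scanF t l =
      (match pyMin ((l.filter (fun e => PySem.Str.isIn e.1 t)).map (fun e => e.2)) with
       | none => "general"
       | some v => v.2) := by
  induction l with
  | nil => simp [scanF, pyMin]
  | cons e rest ih =>
    obtain ⟨kw, v⟩ := e
    simp only [List.map_cons, List.pairwise_cons] at hpw
    obtain ⟨hv, hpw'⟩ := hpw
    by_cases h : PySem.Str.isIn kw t = true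
    · have hscan : scanF t ((kw, v) :: rest) = v.2 := by
        simp only [scanF]; rw [if_pos h]
      have hfil : List.filter (fun e => PySem.Str.isIn e.1 t) ((kw, v) :: rest) =
          (kw, v) :: List.filter (fun e => PySem.Str.isIn e.1 t) rest := by
        rw [List.filter_cons, if_pos h]
      have hall : ∀ x ∈ (List.filter (fun e => PySem.Str.isIn e.1 t) rest).map
          (fun e => e.2), pairLtB x v = false := by
        intro x hx
        obtain ⟨e', he', rfl⟩ := List.mem_map.mp hx
        exact pairLe_not_ltB v _
          (hv _ (List.mem_map_of_mem (List.mem_of_mem_filter he')))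
      rw [hscan, hfil, List.map_cons, pyMin, foldl_keep _ v hall]
    · have hscan : scanF t ((kw, v) :: rest) = scanF t rest := by
        simp only [scanF]; rw [if_neg h]
      have hfil : List.filter (fun e => PySem.Str.isIn e.1 t) ((kw, v) :: rest) =
          List.filter (fun e => PySem.Str.isIn e.1 t) rest := by
        rw [List.filter_cons, if_neg h]
      rw [hscan, hfil]
      exact ih hpw'

theorem kmap_sorted : List.Pairwise pairLe (keywordMap.map (fun e => e.2)) := by
  unfold keywordMap pairLe
  decide

-- ===== VERDICT (by name: the statement is the Claim_ definition above) =====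
theorem infer_subject_py_spec : Claim_equal_infer_subject_py := by
  intro section_ key text _
  show infer_subject_py section_ key text = infer_subject_py_alt section_ key text
  rw [A_eq_scan, dup_drop, scan_eq_min _ _ kmap_sorted]
  rfl
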